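-- pv_equiv track=rewrite | github.com/SethHWeidman/codeforces | 014_626A_robot_sequence/robot_sequence.py | robot_sequence
-- ===== SOURCE A (Python) =====
-- import collections
--
-- def robot_sequence(n: int, sequence: str) -> int:
--     num_balanced_slices = 0
--
--     start = 0
--
--     for start in range(n - 1):
--         for length in range(2, n + 1 - start):
--             slice = sequence[start : start + length]
--
--             # is slice balanced
--             counter = collections.defaultdict(int)
--             for command in slice:
--                 counter[command] += 1
--             if counter['U'] == counter['D'] and counter['R'] == counter['L']:
--                 num_balanced_slices += 1
--
--     return num_balanced_slices
-- ===== SOURCE B (Python) =====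
-- def robot_sequence(n: int, sequence: str) -> int:
--     # prefix-difference states: states[i] = (#U - #D, #R - #L) over sequence[:i]
--     states = [(0, 0)]
--     ud = rl = 0
--     for ch in sequence:
--         if ch == 'U':
--             ud += 1
--         elif ch == 'D':
--             ud -= 1
--         elif ch == 'R':
--             rl += 1
--         elif ch == 'L':
--             rl -= 1
--         states.append((ud, rl))
--
--     # a substring [i, j) with j - i >= 2 is balanced iff states[i] == states[j];
--     # insert states[j-2] before querying states[j] so only lengths >= 2 count
--     count = {}
--     ans = 0
--     for j in range(2, n + 1):
--         k = states[j - 2]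
--         count[k] = count.get(k, 0) + 1
--         ans += count.get(states[j], 0)
--     return ans
-- ===== Notes on version B (the rewrite author's own statement) =====
-- stated objective: faster
-- what changed: Replaces the triple loop (all O(n^2) substrings, each recounted in O(n)) by a single pass over prefix-difference states (U-D, R-L) with a hashmap counting earlier equal states; Pre_ excludes n > len(sequence), where A's value comes from Python's silent out-of-range slicing (duplicated clamped slices) and B's direct prefix indexing raises IndexError.
-- outside the precondition, e.g. on robot_sequence(3, 'UD'): A returns 2, B raises IndexError
import Mathlib
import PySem

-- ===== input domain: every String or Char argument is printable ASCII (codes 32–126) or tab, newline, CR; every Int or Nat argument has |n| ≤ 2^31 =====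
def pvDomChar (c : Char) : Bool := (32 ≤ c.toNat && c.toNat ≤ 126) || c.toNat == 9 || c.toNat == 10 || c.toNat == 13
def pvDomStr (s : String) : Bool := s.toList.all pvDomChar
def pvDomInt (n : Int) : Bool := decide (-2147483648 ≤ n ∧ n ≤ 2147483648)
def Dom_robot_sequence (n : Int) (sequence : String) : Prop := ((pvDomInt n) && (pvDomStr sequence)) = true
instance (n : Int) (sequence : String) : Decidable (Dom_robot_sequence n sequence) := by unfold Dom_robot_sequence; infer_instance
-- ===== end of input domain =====

-- B replaces A's triple loop with one pass over prefix-difference states and a hashmap; equality proved for n ≤ len(sequence).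

-- ===== PORT A =====
def robot_sequence (n : Int) (sequence : String) : Int :=
  (PySem.List.pyRange 0 (n - 1) 1).foldl (fun acc start =>
    (PySem.List.pyRange 2 (n + 1 - start) 1).foldl (fun acc2 len =>
      let sl := (PySem.Str.slice sequence (some start) (some (start + len))).toList
      let counter := sl.foldl (fun d c => d.modify c 0 (· + 1)) (PySem.Dict.empty : PySem.Dict Char Int)
      if counter.getD 'U' 0 == counter.getD 'D' 0 && counter.getD 'R' 0 == counter.getD 'L' 0
      then acc2 + 1 else acc2) acc) 0

-- ===== PORT B =====
-- one step of Source B's if/elif chain updating (ud, rl)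
def pvBStep (s : Int × Int) (ch : Char) : Int × Int :=
  if ch = 'U' then (s.1 + 1, s.2)
  else if ch = 'D' then (s.1 - 1, s.2)
  else if ch = 'R' then (s.1, s.2 + 1)
  else if ch = 'L' then (s.1, s.2 - 1)
  else s

def robot_sequence_alt (n : Int) (sequence : String) : Int :=
  let build := sequence.toList.foldl
      (fun (acc : (Int × Int) × List (Int × Int)) ch =>
        let s := pvBStep acc.1 ch
        (s, acc.2 ++ [s])) ((0, 0), [(0, 0)])
  let states := build.2
  let res := (PySem.List.pyRange 2 (n + 1) 1).foldl
      (fun (acc : PySem.Dict (Int × Int) Int × Int) j =>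
        let k := PySem.List.pyGetD states (j - 2) (0, 0)   -- states[j-2]; in range under Pre_
        let cnt := acc.1.insert k (acc.1.getD k 0 + 1)
        (cnt, acc.2 + cnt.getD (PySem.List.pyGetD states j (0, 0)) 0)) (PySem.Dict.empty, 0)
  res.2

-- ===== PRECONDITION & SPEC =====
-- Pre_ excludes n > len(sequence): there A's out-of-range slices silently clamp and it still
-- returns a value, while B's direct indexing of the prefix-state list raises IndexError.
def Pre_robot_sequence (n : Int) (sequence : String) : Prop := n ≤ (sequence.toList.length : Int)
instance (n : Int) (sequence : String) : Decidable (Pre_robot_sequence n sequence) := by unfold Pre_robot_sequence; infer_instance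
def pvWitness_robot_sequence : Int × String := (4, "UDRL")

def Spec_robot_sequence (n : Int) (sequence : String) (out : Int) : Prop := out = robot_sequence_alt n sequence
instance (n : Int) (sequence : String) (out : Int) : Decidable (Spec_robot_sequence n sequence out) := by unfold Spec_robot_sequence; infer_instance

-- ===== CLAIM (what is proved, stated in full; the proofs are below) =====
def Claim_equal_robot_sequence : Prop := ∀ (n : Int) (sequence : String), Dom_robot_sequence n sequence → Pre_robot_sequence n sequence → Spec_robot_sequence n sequence (robot_sequence n sequence)

-- ===== LEMMAS AND PROOFS =====

-- prefix-difference key of s at index i (take clamps at s.length)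
def pvKey (s : List Char) (i : Nat) : Int × Int :=
  (((s.take i).count 'U' : Int) - ((s.take i).count 'D' : Int),
   ((s.take i).count 'R' : Int) - ((s.take i).count 'L' : Int))

-- the balance test of a pair of clamped cut points, as a Bool
def pvQ (s : List Char) (a b : Nat) : Bool := pvKey s a == pvKey s b

-- counts of a sub-slice via prefix counts
theorem pv_count_slice (xs : List Char) (c : Char) (p q : Nat) (h : p ≤ q) :
    ((xs.drop p).take (q - p)).count c + (xs.take p).count c = (xs.take q).count c := by
  have : xs.take q = xs.take p ++ (xs.drop p).take (q - p) := by
    rw [← List.take_add]; congr 1; omega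
  rw [this, List.count_append]; omega

-- the counter dict built in A's inner loop reads back as List.count
theorem pv_counter_getD (t : List Char) (c : Char) :
    ((t.foldl (fun d x => d.modify x 0 (· + 1)) (PySem.Dict.empty : PySem.Dict Char Int)).getD c 0)
      = (t.count c : Int) := by
  rw [PySem.Dict.getD_foldl_modify_add_one]
  simp [PySem.Dict.getD_empty]

-- A's balance condition for slice [a, b) equals key equality
theorem pv_cond_eq (s : List Char) (a b : Int) (ha : 0 ≤ a) (hab : a ≤ b) :
    (let sl := PySem.List.slice s (some a) (some b)
     let counter := sl.foldl (fun d c => d.modify c 0 (· + 1)) (PySem.Dict.empty : PySem.Dict Char Int)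
     (counter.getD 'U' 0 == counter.getD 'D' 0 && counter.getD 'R' 0 == counter.getD 'L' 0))
    = pvQ s a.toNat b.toNat := by
  have hb : (0 : Int) ≤ b := le_trans ha hab
  have hab' : a.toNat ≤ b.toNat := by omega
  dsimp only
  rw [PySem.List.slice_toNat s ha hb]
  have hU := pv_count_slice s 'U' a.toNat b.toNat hab'
  have hD := pv_count_slice s 'D' a.toNat b.toNat hab'
  have hR := pv_count_slice s 'R' a.toNat b.toNat hab'
  have hL := pv_count_slice s 'L' a.toNat b.toNat hab'
  simp only [pv_counter_getD, pvQ, pvKey]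
  rw [Bool.eq_iff_iff]
  simp only [Bool.and_eq_true, beq_iff_eq, Prod.mk.injEq]
  omega

-- characterisation of B's states list
theorem pv_states (s : List Char) :
    s.foldl (fun (acc : (Int × Int) × List (Int × Int)) ch =>
        (pvBStep acc.1 ch, acc.2 ++ [pvBStep acc.1 ch])) ((0, 0), [(0, 0)])
      = (pvKey s s.length, (List.range (s.length + 1)).map (pvKey s)) := by
  induction s using List.reverseRecOn with
  | nil => simp [pvKey]
  | append_singleton t c ih =>
    rw [List.foldl_append, ih]
    have hkeep : ∀ i, i ≤ t.length → pvKey (t ++ [c]) i = pvKey t i := by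
      intro i hi
      simp only [pvKey, List.take_append_of_le_length hi]
    have hA : pvBStep (pvKey t t.length) c = pvKey (t ++ [c]) (t.length + 1) := by
      simp only [pvKey, List.take_length,
        List.take_of_length_le (by simp : (t ++ [c]).length ≤ t.length + 1),
        List.count_append, List.count_cons, List.count_nil, pvBStep]
      by_cases h1 : c = 'U' <;> by_cases h2 : c = 'D' <;> by_cases h3 : c = 'R'
        <;> by_cases h4 : c = 'L' <;>
        simp_all [Prod.mk.injEq] <;> omega
    have hB : (List.range (t.length + 1)).map (pvKey t)
        = (List.range (t.length + 1)).map (pvKey (t ++ [c])) := by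
      apply List.map_congr_left
      intro i hi
      rw [hkeep i (by simpa using Nat.lt_succ_iff.mp (List.mem_range.mp hi))]
    simp only [List.foldl_cons, List.foldl_nil, hA, hB]
    simp [List.range_succ]

-- countP over List.range as a Finset sum
theorem pv_countP_range (N : Nat) (p : Nat → Bool) :
    (List.range N).countP p = ∑ k ∈ Finset.range N, (if p k then 1 else 0) := by
  induction N with
  | zero => simp
  | succ N ih => rw [List.range_succ, List.countP_append, Finset.sum_range_succ, ih]; simp [List.countP_cons]

-- the triangle reindexing: sum over start of later matches = sum over end of earlier matches
theorem pv_triangle (g : Nat → Nat → Bool) (M : Nat) :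
    (∑ i ∈ Finset.range M, (List.range (M - i)).countP (fun k => g i (i + k)))
      = ∑ t ∈ Finset.range M, (List.range (t + 1)).countP (fun k => g k t) := by
  have hfil : ∀ i : Nat, Finset.Ico i M = Finset.filter (fun t => i ≤ t) (Finset.range M) := by
    intro i; ext t; simp only [Finset.mem_Ico, Finset.mem_filter, Finset.mem_range]; omega
  have h1 : ∀ i ∈ Finset.range M, ((List.range (M - i)).countP (fun k => g i (i + k)))
      = ∑ t ∈ Finset.range M, (if i ≤ t then (if g i t then 1 else 0) else 0) := by
    intro i _
    calc (List.range (M - i)).countP (fun k => g i (i + k))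
        = ∑ k ∈ Finset.range (M - i), (if g i (i + k) then 1 else 0) := pv_countP_range _ _
      _ = ∑ t ∈ Finset.Ico i M, (if g i t then 1 else 0) :=
          (Finset.sum_Ico_eq_sum_range (fun t => if g i t then 1 else 0) i M).symm
      _ = ∑ t ∈ Finset.filter (fun t => i ≤ t) (Finset.range M), (if g i t then 1 else 0) := by
          rw [hfil]
      _ = ∑ t ∈ Finset.range M, (if i ≤ t then (if g i t then 1 else 0) else 0) :=
          Finset.sum_filter _ _
  have h2 : ∀ t ∈ Finset.range M, ((List.range (t + 1)).countP (fun k => g k t))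
      = ∑ i ∈ Finset.range M, (if i ≤ t then (if g i t then 1 else 0) else 0) := by
    intro t ht
    have hfil2 : Finset.range (t + 1) = Finset.filter (fun i => i ≤ t) (Finset.range M) := by
      ext i
      simp only [Finset.mem_filter, Finset.mem_range] at *
      omega
    calc (List.range (t + 1)).countP (fun k => g k t)
        = ∑ i ∈ Finset.range (t + 1), (if g i t then 1 else 0) := pv_countP_range _ _
      _ = ∑ i ∈ Finset.filter (fun i => i ≤ t) (Finset.range M), (if g i t then 1 else 0) := by
          rw [← hfil2]
      _ = ∑ i ∈ Finset.range M, (if i ≤ t then (if g i t then 1 else 0) else 0) :=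
          Finset.sum_filter _ _
  rw [Finset.sum_congr rfl h1, Finset.sum_congr rfl h2, Finset.sum_comm]

-- the balance test of A's inner loop, named (zeta-reduced body of the port)
def pvCondA (seq : String) (i len : Int) : Bool :=
  ((PySem.Str.slice seq (some i) (some (i + len))).toList.foldl
      (fun d c => d.modify c 0 (· + 1)) (PySem.Dict.empty : PySem.Dict Char Int)).getD 'U' 0 ==
    ((PySem.Str.slice seq (some i) (some (i + len))).toList.foldl
      (fun d c => d.modify c 0 (· + 1)) (PySem.Dict.empty : PySem.Dict Char Int)).getD 'D' 0 &&
  ((PySem.Str.slice seq (some i) (some (i + len))).toList.foldl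
      (fun d c => d.modify c 0 (· + 1)) (PySem.Dict.empty : PySem.Dict Char Int)).getD 'R' 0 ==
    ((PySem.Str.slice seq (some i) (some (i + len))).toList.foldl
      (fun d c => d.modify c 0 (· + 1)) (PySem.Dict.empty : PySem.Dict Char Int)).getD 'L' 0

theorem pv_A_eq (n : Int) (seq : String) :
    robot_sequence n seq
      = ((PySem.List.pyRange 0 (n - 1) 1).map
          (fun i => (((PySem.List.pyRange 2 (n + 1 - i) 1).countP
              (fun len => pvQ seq.toList i.toNat (i + len).toNat)) : Int))).sum := by
  have hbody : ∀ (acc : Int), ∀ i ∈ PySem.List.pyRange 0 (n - 1) 1,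
      (PySem.List.pyRange 2 (n + 1 - i) 1).foldl (fun acc2 len =>
        let sl := (PySem.Str.slice seq (some i) (some (i + len))).toList
        let counter := sl.foldl (fun d c => d.modify c 0 (· + 1)) (PySem.Dict.empty : PySem.Dict Char Int)
        if counter.getD 'U' 0 == counter.getD 'D' 0 && counter.getD 'R' 0 == counter.getD 'L' 0
        then acc2 + 1 else acc2) acc
      = acc + (((PySem.List.pyRange 2 (n + 1 - i) 1).countP
          (fun len => pvQ seq.toList i.toNat (i + len).toNat)) : Int) := by
    intro acc i hi
    have hi0 : 0 ≤ i := (PySem.List.mem_pyRange_one.mp hi).1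
    rw [show (fun (acc2 len : Int) =>
        let sl := (PySem.Str.slice seq (some i) (some (i + len))).toList
        let counter := sl.foldl (fun d c => d.modify c 0 (· + 1)) (PySem.Dict.empty : PySem.Dict Char Int)
        if counter.getD 'U' 0 == counter.getD 'D' 0 && counter.getD 'R' 0 == counter.getD 'L' 0
        then acc2 + 1 else acc2)
      = (fun (acc2 len : Int) => if pvCondA seq i len then acc2 + 1 else acc2) from rfl]
    rw [PySem.List.foldl_if_add_one]
    congr 2
    apply List.countP_congr
    intro len hlen
    have h2 : 2 ≤ len := (PySem.List.mem_pyRange_one.mp hlen).1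
    have hc := pv_cond_eq seq.toList i (i + len) hi0 (by omega)
    dsimp only at hc
    unfold pvCondA
    simp only [PySem.Str.toList_slice, PySem.Chars.slice_eq_listSlice]
    rw [hc]
  unfold robot_sequence
  rw [PySem.List.foldl_congr_mem _ _ _ _ hbody, PySem.List.foldl_add]
  simp

-- keys inserted by B's loop for iterations strictly below T
def pvKs (s : List Char) (T : Int) : List (Int × Int) :=
  (PySem.List.pyRange 2 T 1).map (fun j => pvKey s (j - 2).toNat)

-- B's loop body once its list lookups are evaluated
def pvBody (s : List Char) (acc : PySem.Dict (Int × Int) Int × Int) (j : Int) :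
    PySem.Dict (Int × Int) Int × Int :=
  (acc.1.insert (pvKey s (j - 2).toNat) (acc.1.getD (pvKey s (j - 2).toNat) 0 + 1),
   acc.2 + (acc.1.insert (pvKey s (j - 2).toNat)
       (acc.1.getD (pvKey s (j - 2).toNat) 0 + 1)).getD (pvKey s j.toNat) 0)

theorem pv_st (s : List Char) (i : Int) (hi : 0 ≤ i) (hm : i ≤ (s.length : Int)) :
    PySem.List.pyGetD ((List.range (s.length + 1)).map (pvKey s)) i (0, 0)
      = pvKey s i.toNat := by
  rw [PySem.List.pyGetD_eq_getElem _ _ hi (by simp; omega)]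
  rw [List.getElem_map, List.getElem_range]

theorem pv_B_fold (s : List Char) (N : Nat) :
    (∀ v, ((PySem.List.pyRange 2 (2 + (N : Int)) 1).foldl (pvBody s) (PySem.Dict.empty, 0)).1.getD v 0
        = ((pvKs s (2 + (N : Int))).count v : Int))
    ∧ ((PySem.List.pyRange 2 (2 + (N : Int)) 1).foldl (pvBody s) (PySem.Dict.empty, 0)).2
        = ((PySem.List.pyRange 2 (2 + (N : Int)) 1).map
            (fun j => ((pvKs s (j + 1)).count (pvKey s j.toNat) : Int))).sum := by
  induction N with
  | zero =>
    constructor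
    · intro v
      rw [PySem.List.pyRange_one_eq_nil (by norm_num)]
      simp [pvKs, PySem.Dict.getD_empty]
    · rw [PySem.List.pyRange_one_eq_nil (by norm_num)]
      simp
  | succ N ih =>
    have hsplit : PySem.List.pyRange 2 (2 + ((N + 1 : Nat) : Int)) 1
        = PySem.List.pyRange 2 (2 + (N : Int)) 1 ++ [2 + (N : Int)] := by
      rw [show (2 + ((N + 1 : Nat) : Int)) = (2 + (N : Int)) + 1 by push_cast; ring]
      exact PySem.List.pyRange_one_succ_right (by omega)
    have hj2 : ((2 + (N : Int)) - 2).toNat = N := by omega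
    have hdict : ∀ v,
        ((PySem.List.pyRange 2 (2 + ((N + 1 : Nat) : Int)) 1).foldl (pvBody s) (PySem.Dict.empty, 0)).1.getD v 0
          = ((pvKs s (2 + ((N + 1 : Nat) : Int))).count v : Int) := by
      intro v
      rw [hsplit, List.foldl_append, List.foldl_cons, List.foldl_nil]
      show (pvBody s _ _).1.getD v 0 = _
      rw [pvBody]
      simp only [PySem.Dict.getD_insert]
      rw [pvKs, hsplit, List.map_append, List.count_append, List.map_cons, List.map_nil, hj2]
      by_cases hv : v = pvKey s N
      · subst hv
        rw [if_pos rfl, ih.1 (pvKey s N), pvKs]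
        simp
      · rw [if_neg hv, ih.1 v, pvKs]
        have hz : List.count v [pvKey s N] = 0 := by
          simp [List.count_cons]
          exact fun h => (hv h.symm).elim
        rw [hz]
        simp
    refine ⟨hdict, ?_⟩
    rw [hsplit, List.foldl_append, List.foldl_cons, List.foldl_nil]
    rw [List.map_append, List.sum_append]
    show (pvBody s _ _).2 = _
    conv_lhs => rw [pvBody]
    rw [ih.2]
    have hv := hdict (pvKey s (2 + (N : Int)).toNat)
    rw [hsplit, List.foldl_append, List.foldl_cons, List.foldl_nil] at hv
    simp only [pvBody] at hv
    rw [hv]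
    rw [show (2 + ((N + 1 : Nat) : Int)) = 2 + (N : Int) + 1 by push_cast; ring]
    simp

theorem pv_B_eq (n : Int) (seq : String) (hpre : n ≤ (seq.toList.length : Int)) :
    robot_sequence_alt n seq
      = ((PySem.List.pyRange 2 (n + 1) 1).map
          (fun j => ((pvKs seq.toList (j + 1)).count (pvKey seq.toList j.toNat) : Int))).sum := by
  have hfold : robot_sequence_alt n seq
      = ((PySem.List.pyRange 2 (n + 1) 1).foldl (pvBody seq.toList) (PySem.Dict.empty, 0)).2 := by
    unfold robot_sequence_alt
    simp only [pv_states]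
    congr 1
    apply PySem.List.foldl_congr_mem
    intro acc j hj
    have h2 : 2 ≤ j := (PySem.List.mem_pyRange_one.mp hj).1
    have hub : j < n + 1 := (PySem.List.mem_pyRange_one.mp hj).2
    rw [pv_st seq.toList (j - 2) (by omega) (by omega),
        pv_st seq.toList j (by omega) (by omega), pvBody]
  rw [hfold]
  by_cases hn : n + 1 ≤ 2
  · rw [PySem.List.pyRange_one_eq_nil (by omega)]
    rfl
  · have hN : (2 + (((n - 1).toNat : Nat) : Int)) = n + 1 := by omega
    rw [← hN]
    exact (pv_B_fold seq.toList (n - 1).toNat).2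

theorem pv_count_map {α β : Type} [BEq β] (f : α → β) (l : List α) (v : β) :
    (l.map f).count v = l.countP (fun a => f a == v) := by
  induction l with
  | nil => rfl
  | cons a t ih => simp [List.count_cons, List.countP_cons, ih]

theorem pv_sum_cast_map {α : Type} (l : List α) (f : α → Nat) :
    (l.map (fun a => ((f a) : Int))).sum = ((l.map f).sum : Int) := by
  induction l with
  | nil => simp
  | cons a t ih => simp [ih]

theorem pv_sum_range_fin (N : Nat) (f : Nat → Nat) :
    ((List.range N).map f).sum = ∑ k ∈ Finset.range N, f k := by
  induction N with
  | zero => simp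
  | succ n ih =>
    rw [List.range_succ, List.map_append, List.sum_append, Finset.sum_range_succ, ih]
    simp

theorem pv_main (n : Int) (seq : String) (hpre : n ≤ (seq.toList.length : Int)) :
    robot_sequence n seq = robot_sequence_alt n seq := by
  rw [pv_A_eq, pv_B_eq n seq hpre]
  by_cases hn : n ≤ 1
  · rw [PySem.List.pyRange_one_eq_nil (show n - 1 ≤ 0 by omega),
        PySem.List.pyRange_one_eq_nil (show n + 1 ≤ 2 by omega)]
    rfl
  · have hn1 : 1 < n := by omega
    have hA : ((PySem.List.pyRange 0 (n - 1) 1).map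
          (fun i => (((PySem.List.pyRange 2 (n + 1 - i) 1).countP
              (fun len => pvQ seq.toList i.toNat (i + len).toNat)) : Int))).sum
        = (((∑ i ∈ Finset.range (n - 1).toNat,
            (List.range ((n - 1).toNat - i)).countP
              (fun k => pvQ seq.toList i (i + k + 2)) : Nat)) : Int) := by
      rw [PySem.List.pyRange_one 0 (n - 1), List.map_map]
      rw [show (n - 1 - 0).toNat = (n - 1).toNat by omega]
      rw [List.map_congr_left (g := fun (k : Nat) =>
          (((List.range ((n - 1).toNat - k)).countP
            (fun t => pvQ seq.toList k (k + t + 2)) : Nat) : Int)) ?_]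
      · rw [pv_sum_cast_map, pv_sum_range_fin]
      · intro k hk
        have hkM : k < (n - 1).toNat := List.mem_range.mp hk
        simp only [Function.comp]
        rw [PySem.List.pyRange_one 2 (n + 1 - (0 + (k : Int))), List.countP_map]
        rw [show (n + 1 - (0 + (k : Int)) - 2).toNat = (n - 1).toNat - k by omega]
        congr 1
        apply List.countP_congr
        intro t _
        simp only [Function.comp]
        rw [show ((0 : Int) + (k : Nat)).toNat = k by omega,
            show ((0 + (k : Int)) + (2 + (t : Int))).toNat = k + t + 2 by omega]
    have hB : ((PySem.List.pyRange 2 (n + 1) 1).map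
          (fun j => ((pvKs seq.toList (j + 1)).count (pvKey seq.toList j.toNat) : Int))).sum
        = (((∑ t ∈ Finset.range (n - 1).toNat,
            (List.range (t + 1)).countP (fun k => pvQ seq.toList k (t + 2)) : Nat)) : Int) := by
      rw [PySem.List.pyRange_one 2 (n + 1), List.map_map]
      rw [show (n + 1 - 2).toNat = (n - 1).toNat by omega]
      rw [List.map_congr_left (g := fun (t : Nat) =>
          (((List.range (t + 1)).countP (fun k => pvQ seq.toList k (t + 2)) : Nat) : Int)) ?_]
      · rw [pv_sum_cast_map, pv_sum_range_fin]
      · intro t _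
        simp only [Function.comp]
        rw [show ((2 : Int) + (t : Nat)).toNat = t + 2 by omega]
        rw [pvKs, PySem.List.pyRange_one 2 ((2 : Int) + (t : Nat) + 1), List.map_map]
        rw [show ((2 : Int) + (t : Nat) + 1 - 2).toNat = t + 1 by omega]
        rw [List.map_congr_left (g := fun (u : Nat) => pvKey seq.toList u) ?_]
        · rw [pv_count_map]
          norm_cast
        · intro u _
          simp only [Function.comp]
          rw [show ((2 : Int) + (u : Nat) - 2).toNat = u by omega]
    rw [hA, hB]
    congr 1
    exact pv_triangle (fun a b => pvQ seq.toList a (b + 2)) (n - 1).toNat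

-- ===== VERDICT (by name: the statement is the Claim_ definition above) =====
theorem robot_sequence_spec : Claim_equal_robot_sequence := by
  intro n seq _ hpre
  unfold Spec_robot_sequence
  exact pv_main n seq hpre
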